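-- pv_equiv track=rewrite | github.com/dollythedog/project_wizard | app_v2_5.py | parse_charter_to_form_data
-- ===== SOURCE A (Python) =====
-- def parse_charter_to_form_data(charter_text):
--     """Extract form data from existing charter"""
--     data = {}
--     lines = charter_text.split('\n')
--
--     # Simple parsing - look for headers and content
--     current_section = None
--     content_buffer = []
--
--     for line in lines:
--         if line.startswith('# Project Charter:'):
--             data['project_title'] = line.replace('# Project Charter:', '').strip()
--         elif line.startswith('**Project Owner:**'):
--             data['project_owner'] = line.replace('**Project Owner:**', '').strip()
--         elif line.startswith('**Project Type:**'):
--             data['project_type'] = line.replace('**Project Type:**', '').strip()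
--         elif line.startswith('## '):
--             # Save previous section
--             if current_section and content_buffer:
--                 data[current_section] = '\n'.join(content_buffer).strip()
--             # Start new section
--             section_name = line.replace('##', '').strip().lower().replace(' ', '_')
--             current_section = section_name
--             content_buffer = []
--         elif current_section and line.strip():
--             content_buffer.append(line)
--
--     # Save last section
--     if current_section and content_buffer:
--         data[current_section] = '\n'.join(content_buffer).strip()
--
--     return data
-- ===== SOURCE B (Python) =====
-- SPECIAL_PREFIXES = ('# Project Charter:', '**Project Owner:**', '**Project Type:**')
-- SPECIAL_KEYS = ('project_title', 'project_owner', 'project_type')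
--
--
-- def _scan_specials(block_lines, data):
--     """Fill the scalar keys from the special-prefix lines of a block (last wins)."""
--     for line in block_lines:
--         for prefix, key in zip(SPECIAL_PREFIXES, SPECIAL_KEYS):
--             if line.startswith(prefix):
--                 data[key] = line.replace(prefix, '').strip()
--                 break
--
--
-- def parse_charter_to_form_data(charter_text):
--     """Extract form data from existing charter (two-phase: partition into blocks, then fill)."""
--     lines = charter_text.split('\n')
--     # Phase 1: partition into a preamble and '## '-headed blocks.
--     i = 0
--     preamble = []
--     while i < len(lines) and not lines[i].startswith('## '):
--         preamble.append(lines[i])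
--         i += 1
--     blocks = []
--     while i < len(lines):
--         header = lines[i]
--         i += 1
--         body = []
--         while i < len(lines) and not lines[i].startswith('## '):
--             body.append(lines[i])
--             i += 1
--         blocks.append((header, body))
--     # Phase 2: preamble scalars, then each block's scalars and section content.
--     data = {}
--     _scan_specials(preamble, data)
--     for header, body in blocks:
--         _scan_specials(body, data)
--         name = header.replace('##', '').strip().lower().replace(' ', '_')
--         kept = [l for l in body
--                 if l.strip() and not any(l.startswith(p) for p in SPECIAL_PREFIXES)]
--         if name and kept:
--             data[name] = '\n'.join(kept).strip()
--     return data
-- ===== Notes on version B (the rewrite author's own statement) =====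
-- stated objective: alternative
-- what changed: A is a single-pass state machine with a running current-section/content-buffer; B first partitions the lines into a preamble and a list of header-prefixed section blocks, then fills the dict per block (scalars from special-prefix lines, then the section entry when the block has content lines).
import Mathlib
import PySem

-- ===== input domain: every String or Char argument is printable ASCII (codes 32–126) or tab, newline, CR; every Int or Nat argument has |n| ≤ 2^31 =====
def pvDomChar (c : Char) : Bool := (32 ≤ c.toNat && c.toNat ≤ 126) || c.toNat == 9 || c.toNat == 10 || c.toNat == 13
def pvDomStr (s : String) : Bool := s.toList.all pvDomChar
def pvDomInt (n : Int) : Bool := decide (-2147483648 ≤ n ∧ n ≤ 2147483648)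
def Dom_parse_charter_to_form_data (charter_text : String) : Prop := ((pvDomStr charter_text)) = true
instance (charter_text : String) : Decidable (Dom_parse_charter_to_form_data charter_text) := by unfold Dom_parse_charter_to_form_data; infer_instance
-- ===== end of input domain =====

-- B is an alternative decomposition (two-phase: partition into header blocks, then fill the dict
-- per block) of A's one-pass running-buffer state machine; return values proved equal, no speed claim.

-- ===== PORT A =====
-- 'if current_section and content_buffer: data[current_section] = "\n".join(content_buffer).strip()'
-- (this code appears twice in A, so it is a helper here). current_section = None is modeled as "".
def pvSaveIf (d : PySem.Dict String String) (cs : String) (buf : List String) :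
    PySem.Dict String String :=
  if cs ≠ "" ∧ buf ≠ [] then d.insert cs (PySem.Str.strip (PySem.Str.join "\n" buf)) else d

-- one iteration of A's for-loop, state = (data, current_section, content_buffer)
def pvStepA (st : PySem.Dict String String × String × List String) (line : String) :
    PySem.Dict String String × String × List String :=
  let (d, cs, buf) := st
  if PySem.Str.startswith line "# Project Charter:" then
    (d.insert "project_title" (PySem.Str.strip (PySem.Str.replace line "# Project Charter:" "")), cs, buf)
  else if PySem.Str.startswith line "**Project Owner:**" then
    (d.insert "project_owner" (PySem.Str.strip (PySem.Str.replace line "**Project Owner:**" "")), cs, buf)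
  else if PySem.Str.startswith line "**Project Type:**" then
    (d.insert "project_type" (PySem.Str.strip (PySem.Str.replace line "**Project Type:**" "")), cs, buf)
  else if PySem.Str.startswith line "## " then
    (pvSaveIf d cs buf,
     PySem.Str.replace (PySem.Str.lower (PySem.Str.strip (PySem.Str.replace line "##" ""))) " " "_",
     [])
  else if cs ≠ "" ∧ PySem.Str.strip line ≠ "" then (d, cs, buf ++ [line])
  else (d, cs, buf)

def parse_charter_to_form_data (charter_text : String) : List (String × String) :=
  let lines := (PySem.Str.split? charter_text "\n").getD []
  let st := lines.foldl pvStepA (PySem.Dict.empty, "", [])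
  (pvSaveIf st.1 st.2.1 st.2.2).items

-- ===== PORT B =====
def pvIsHeader (l : String) : Bool := PySem.Str.startswith l "## "

-- one line of _scan_specials
def pvSpecialStep (d : PySem.Dict String String) (line : String) : PySem.Dict String String :=
  if PySem.Str.startswith line "# Project Charter:" then
    d.insert "project_title" (PySem.Str.strip (PySem.Str.replace line "# Project Charter:" ""))
  else if PySem.Str.startswith line "**Project Owner:**" then
    d.insert "project_owner" (PySem.Str.strip (PySem.Str.replace line "**Project Owner:**" ""))
  else if PySem.Str.startswith line "**Project Type:**" then
    d.insert "project_type" (PySem.Str.strip (PySem.Str.replace line "**Project Type:**" ""))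
  else d

def pvScanSpecials (block : List String) (d : PySem.Dict String String) :
    PySem.Dict String String :=
  block.foldl pvSpecialStep d

-- phase 1, second while-loop: gather (header, body) blocks
def pvBlocksOf : List String → List (String × List String)
  | [] => []
  | h :: rest =>
      (h, rest.takeWhile (fun l => !pvIsHeader l)) ::
        pvBlocksOf (rest.dropWhile (fun l => !pvIsHeader l))
  termination_by l => l.length
  decreasing_by exact Nat.lt_succ_of_le (List.length_dropWhile_le _ _)

def pvSectionName (h : String) : String :=
  PySem.Str.replace (PySem.Str.lower (PySem.Str.strip (PySem.Str.replace h "##" ""))) " " "_"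

def pvKeptP (l : String) : Bool :=
  PySem.Str.strip l ≠ "" &&
    !(PySem.Str.startswith l "# Project Charter:" ||
      PySem.Str.startswith l "**Project Owner:**" ||
      PySem.Str.startswith l "**Project Type:**")

-- phase 2, one block: scalars of the body, then the section entry when non-empty
def pvProcessBlock (d : PySem.Dict String String) (b : String × List String) :
    PySem.Dict String String :=
  let d1 := pvScanSpecials b.2 d
  let name := pvSectionName b.1
  let kept := b.2.filter pvKeptP
  if name ≠ "" ∧ kept ≠ [] then d1.insert name (PySem.Str.strip (PySem.Str.join "\n" kept))
  else d1

def parse_charter_to_form_data_alt (charter_text : String) : List (String × String) :=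
  let lines := (PySem.Str.split? charter_text "\n").getD []
  let preamble := lines.takeWhile (fun l => !pvIsHeader l)
  let rest := lines.dropWhile (fun l => !pvIsHeader l)
  ((pvBlocksOf rest).foldl pvProcessBlock (pvScanSpecials preamble PySem.Dict.empty)).items

-- ===== PRECONDITION & SPEC =====
def Spec_parse_charter_to_form_data (charter_text : String) (out : List (String × String)) : Prop := out = parse_charter_to_form_data_alt charter_text
instance (charter_text : String) (out : List (String × String)) : Decidable (Spec_parse_charter_to_form_data charter_text out) := by unfold Spec_parse_charter_to_form_data; infer_instance

-- ===== CLAIM (what is proved, stated in full; the proofs are below) =====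
def Claim_equal_parse_charter_to_form_data : Prop := ∀ (charter_text : String), Dom_parse_charter_to_form_data charter_text → Spec_parse_charter_to_form_data charter_text (parse_charter_to_form_data charter_text)

-- ===== LEMMAS AND PROOFS =====

-- A's loop followed by the final save, as a function of the initial state
def pvLoopA (st : PySem.Dict String String × String × List String) (lines : List String) :
    PySem.Dict String String :=
  let st' := lines.foldl pvStepA st
  pvSaveIf st'.1 st'.2.1 st'.2.2

theorem pvSaveIf_none (d : PySem.Dict String String) (buf : List String) :
    pvSaveIf d "" buf = d := by
  simp [pvSaveIf]

theorem pvStepA_header {l : String} (h : pvIsHeader l = true)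
    (d : PySem.Dict String String) (cs : String) (buf : List String) :
    pvStepA (d, cs, buf) l = (pvSaveIf d cs buf, pvSectionName l, []) := by
  obtain ⟨t, ht⟩ : ∃ t, l.toList = '#' :: '#' :: ' ' :: t := by
    have h' : ("## ".toList) <+: l.toList := by
      rw [← PySem.Chars.startswith_iff]
      simpa [pvIsHeader, PySem.Str.startswith_eq] using h
    obtain ⟨t, ht⟩ := h'
    exact ⟨t, by simpa using ht.symm⟩
  have h1 : PySem.Str.startswith l "# Project Charter:" = false := by
    rw [PySem.Str.startswith_eq, ht]; simp [PySem.Chars.startswith, List.isPrefixOf]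
  have h2 : PySem.Str.startswith l "**Project Owner:**" = false := by
    rw [PySem.Str.startswith_eq, ht]; simp [PySem.Chars.startswith, List.isPrefixOf]
  have h3 : PySem.Str.startswith l "**Project Type:**" = false := by
    rw [PySem.Str.startswith_eq, ht]; simp [PySem.Chars.startswith, List.isPrefixOf]
  have h4 : PySem.Str.startswith l "## " = true := by simpa [pvIsHeader] using h
  simp at h1 h2 h3 h4
  simp [pvStepA, h1, h2, h3, h4, pvSectionName]

theorem pvStepA_nonheader {l : String} (h : pvIsHeader l = false)
    (d : PySem.Dict String String) (cs : String) (buf : List String) :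
    pvStepA (d, cs, buf) l =
      (pvSpecialStep d l, cs,
        buf ++ (if cs ≠ "" then (if pvKeptP l then [l] else []) else [])) := by
  by_cases c1 : PySem.Str.startswith l "# Project Charter:" <;>
  by_cases c2 : PySem.Str.startswith l "**Project Owner:**" <;>
  by_cases c3 : PySem.Str.startswith l "**Project Type:**" <;>
  by_cases c4 : cs = "" <;>
  by_cases c5 : PySem.Str.strip l = "" <;>
  simp_all [pvStepA, pvSpecialStep, pvKeptP, pvIsHeader]

theorem pvProcessBlock_eq (d : PySem.Dict String String) (h : String) (body : List String) :
    pvProcessBlock d (h, body) =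
      pvSaveIf (pvScanSpecials body d) (pvSectionName h)
        (if pvSectionName h ≠ "" then body.filter pvKeptP else []) := by
  by_cases hn : pvSectionName h = "" <;>
  by_cases hk : body.filter pvKeptP = [] <;>
  simp [pvProcessBlock, pvSaveIf, hn, hk]

theorem pvBlocksOf_nil : pvBlocksOf [] = [] := by rw [pvBlocksOf]

theorem pvBlocksOf_cons (h : String) (rest : List String) :
    pvBlocksOf (h :: rest) = (h, rest.takeWhile (fun l => !pvIsHeader l)) ::
        pvBlocksOf (rest.dropWhile (fun l => !pvIsHeader l)) := by
  rw [pvBlocksOf]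

theorem pvLoopA_eq (lines : List String) :
    ∀ (d : PySem.Dict String String) (cs : String) (buf : List String),
    pvLoopA (d, cs, buf) lines =
      (pvBlocksOf (lines.dropWhile (fun l => !pvIsHeader l))).foldl pvProcessBlock
        (pvSaveIf (pvScanSpecials (lines.takeWhile (fun l => !pvIsHeader l)) d) cs
          (buf ++ (if cs ≠ "" then (lines.takeWhile (fun l => !pvIsHeader l)).filter pvKeptP else []))) := by
  induction lines with
  | nil =>
      intro d cs buf
      simp [pvLoopA, pvBlocksOf_nil, pvScanSpecials]
  | cons l rest ih =>
      intro d cs buf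
      have hfold : pvLoopA (d, cs, buf) (l :: rest) = pvLoopA (pvStepA (d, cs, buf) l) rest := by
        simp [pvLoopA]
      by_cases hl : pvIsHeader l = true
      · rw [hfold, pvStepA_header hl]
        rw [ih]
        rw [List.dropWhile_cons_of_neg (by simp [hl]), List.takeWhile_cons_of_neg (by simp [hl])]
        rw [pvBlocksOf_cons, List.foldl_cons, pvProcessBlock_eq]
        simp [pvScanSpecials]
      · have hl' : pvIsHeader l = false := by simpa using hl
        rw [hfold, pvStepA_nonheader hl']
        rw [ih]
        rw [List.dropWhile_cons_of_pos (by simp [hl']), List.takeWhile_cons_of_pos (by simp [hl'])]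
        have hscan : ∀ d', pvScanSpecials (l :: rest.takeWhile (fun l => !pvIsHeader l)) d'
            = pvScanSpecials (rest.takeWhile (fun l => !pvIsHeader l)) (pvSpecialStep d' l) := by
          intro d'; simp [pvScanSpecials]
        rw [hscan]
        by_cases c4 : cs = ""
        · simp [c4]
        · simp only [List.filter_cons, c4, ne_eq, not_false_iff, if_true, List.append_assoc]
          congr 1
          by_cases c5 : pvKeptP l <;> simp [c5]

-- ===== VERDICT (by name: the statement is the Claim_ definition above) =====
theorem parse_charter_to_form_data_spec : Claim_equal_parse_charter_to_form_data := by
  intro charter_text _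
  unfold Spec_parse_charter_to_form_data parse_charter_to_form_data parse_charter_to_form_data_alt
  have h := pvLoopA_eq ((PySem.Str.split? charter_text "\n").getD []) PySem.Dict.empty "" []
  unfold pvLoopA at h
  simp only [pvSaveIf_none] at h
  simp only [h]
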